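-- pv_equiv track=rewrite | github.com/maxLonGest/python-training | Week_05/l_16/solution.py | lastMaxInList
-- ===== SOURCE A (Python) =====
-- def lastMaxInList(_list):
--     maxList = _list[0]
--     indexMax = 0
--     for i in range(len(_list)):
--         if _list[i] >= maxList:
--             maxList = _list[i]
--             indexMax = i
--     return maxList, indexMax
-- ===== SOURCE B (Python) =====
-- def lastMaxInList(_list):
--     m = max(_list)
--     return m, len(_list) - 1 - _list[::-1].index(m)
-- ===== Notes on version B (the rewrite author's own statement) =====
-- stated objective: simpler
-- what changed: Replaces A's single running-max/last-index loop with a two-stage decomposition: compute the maximum with max(), then locate its last occurrence via the index of the first occurrence in the reversed list.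
import Mathlib
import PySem

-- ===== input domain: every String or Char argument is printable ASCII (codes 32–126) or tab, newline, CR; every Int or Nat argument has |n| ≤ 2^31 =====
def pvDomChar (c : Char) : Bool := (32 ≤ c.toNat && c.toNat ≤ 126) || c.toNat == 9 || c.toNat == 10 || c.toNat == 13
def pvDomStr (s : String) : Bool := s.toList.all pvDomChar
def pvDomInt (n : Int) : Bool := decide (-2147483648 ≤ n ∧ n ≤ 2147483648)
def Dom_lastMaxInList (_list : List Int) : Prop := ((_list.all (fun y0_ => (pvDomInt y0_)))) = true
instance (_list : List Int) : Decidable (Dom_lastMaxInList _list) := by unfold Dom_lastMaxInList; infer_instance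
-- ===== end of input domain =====

-- B replaces A's single running-max/last-index loop by a two-stage decomposition
-- (max() first, then last index via the reversed list); objective: simpler.

-- ===== PORT A =====
-- literal port of A's running-max loop: state (maxList, indexMax), for i in range(len(_list))
def lastMaxInList (_list : List Int) : Int × Int :=
  let maxList : Int := PySem.List.pyGetD _list 0 0   -- _list[0]; empty list (IndexError) excluded by Pre_
  let indexMax : Int := 0
  (PySem.List.pyRange 0 (_list.length : Int) 1).foldl
    (fun (st : Int × Int) (i : Int) =>
      if PySem.List.pyGetD _list i 0 ≥ st.1 then (PySem.List.pyGetD _list i 0, i) else st)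
    (maxList, indexMax)

-- ===== PORT B =====
-- literal port of Source B: m = max(_list); return m, len(_list) - 1 - _list[::-1].index(m)
def lastMaxInList_alt (_list : List Int) : Int × Int :=
  let m : Int := (PySem.List.max? _list (fun x => x)).getD 0   -- max(_list); empty (ValueError) excluded by Pre_
  let j : Nat := (PySem.List.index? _list.reverse m).getD 0    -- _list[::-1].index(m); m ∈ _list so it is found
  (m, (_list.length : Int) - 1 - (j : Int))

-- ===== PRECONDITION & SPEC =====
-- Pre_ excludes only the empty list, on which A raises IndexError (and B raises ValueError).
def Pre_lastMaxInList (_list : List Int) : Prop := _list ≠ []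
instance (_list : List Int) : Decidable (Pre_lastMaxInList _list) := by unfold Pre_lastMaxInList; infer_instance
def pvWitness_lastMaxInList : List Int := [3, 1, 3]

def Spec_lastMaxInList (_list : List Int) (out : Int × Int) : Prop := out = lastMaxInList_alt _list
instance (_list : List Int) (out : Int × Int) : Decidable (Spec_lastMaxInList _list out) := by unfold Spec_lastMaxInList; infer_instance

-- ===== CLAIM (what is proved, stated in full; the proofs are below) =====
def Claim_equal_lastMaxInList : Prop := ∀ (_list : List Int), Dom_lastMaxInList _list → Pre_lastMaxInList _list → Spec_lastMaxInList _list (lastMaxInList _list)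

-- ===== LEMMAS AND PROOFS =====

-- reference function: (max of the list, last index attaining it)
def lmRefN : List Int → Int × Nat
  | [] => (0, 0)
  | [x] => (x, 0)
  | x :: y :: t =>
    let r := lmRefN (y :: t)
    if r.1 ≥ x then (r.1, r.2 + 1) else (x, 0)

theorem lmRefN_fst_isMax : ∀ (l : List Int), ∀ z ∈ l, z ≤ (lmRefN l).1 := by
  intro l
  induction l with
  | nil => intro z hz; cases hz
  | cons x t ih =>
    intro z hz
    cases t with
    | nil => simp at hz; simp [lmRefN, hz]
    | cons y s =>
      simp only [lmRefN]
      rcases List.mem_cons.mp hz with rfl | hz'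
      · split_ifs with h <;> simp <;> omega
      · have := ih z hz'
        split_ifs with h <;> simp <;> omega

theorem lmRefN_fst_mem : ∀ (l : List Int), l ≠ [] → (lmRefN l).1 ∈ l := by
  intro l
  induction l with
  | nil => intro h; exact absurd rfl h
  | cons x t ih =>
    intro _
    cases t with
    | nil => simp [lmRefN]
    | cons y s =>
      simp only [lmRefN]
      split_ifs with h
      · exact List.mem_cons_of_mem x (ih (by simp))
      · exact List.mem_cons_self ..

theorem lmRefN_snd_le : ∀ (x : Int) (t : List Int), (lmRefN (x :: t)).2 ≤ t.length := by
  intro x t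
  induction t generalizing x with
  | nil => simp [lmRefN]
  | cons y s ih =>
    simp only [lmRefN]
    have := ih y
    split_ifs with h <;> simp <;> omega

theorem foldl_max_comm (l : List Int) : ∀ (a b : Int), l.foldl max (max a b) = max a (l.foldl max b) := by
  induction l with
  | nil => intro a b; simp
  | cons c t ih =>
    intro a b
    simp only [List.foldl_cons]
    rw [max_assoc, ih]

theorem lmRefN_fst_eq_foldl_max : ∀ (x : Int) (t : List Int), (lmRefN (x :: t)).1 = t.foldl max x := by
  intro x t
  induction t generalizing x with
  | nil => simp [lmRefN]
  | cons y s ih =>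
    simp only [lmRefN, List.foldl_cons]
    rw [foldl_max_comm, ← ih y]
    split_ifs with h
    · exact (max_eq_right (by omega)).symm
    · exact (max_eq_left (by omega)).symm

theorem lmRefN_rev_index : ∀ (x : Int) (t : List Int),
    PySem.List.index? ((x :: t).reverse) (lmRefN (x :: t)).1 = some (t.length - (lmRefN (x :: t)).2) := by
  intro x t
  induction t generalizing x with
  | nil => simp [lmRefN]
  | cons y s ih =>
    simp only [lmRefN]
    split_ifs with h
    · -- max of tail wins: lies in (y::s).reverse
      have hmem : (lmRefN (y :: s)).1 ∈ (y :: s).reverse :=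
        List.mem_reverse.mpr (lmRefN_fst_mem (y :: s) (by simp))
      have hrw : (x :: y :: s).reverse = (y :: s).reverse ++ [x] := by simp
      rw [hrw, PySem.List.index?_append_of_mem _ hmem, ih y]
      have := lmRefN_snd_le y s
      congr 1
      simp only [List.length_cons]
      omega
    · -- x is a new strict maximum: x ∉ y::s
      have hnot : x ∉ (y :: s).reverse := by
        rw [List.mem_reverse]
        intro hx
        have := lmRefN_fst_isMax (y :: s) x hx
        omega
      have hrw : (x :: y :: s).reverse = (y :: s).reverse ++ [x] := by simp
      rw [hrw]
      rw [show ((x, 0) : Int × Nat).1 = x from rfl, show ((x, 0) : Int × Nat).2 = 0 from rfl]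
      rw [PySem.List.index?_append_singleton_self _ x hnot]
      simp

-- the generalized characterisation of A's fold over a suffix
theorem foldA (xs : List Int) : ∀ (full : List Int) (a : Nat) (st : Int × Int),
    full.drop a = xs → xs ≠ [] →
    (List.range' a xs.length).foldl
      (fun (st : Int × Int) (k : Nat) =>
        if full.getD k 0 ≥ st.1 then (full.getD k 0, (k : Int)) else st) st
    = (if (lmRefN xs).1 ≥ st.1 then ((lmRefN xs).1, (a : Int) + ((lmRefN xs).2 : Int)) else st) := by
  induction xs with
  | nil => intro _ _ _ _ h; exact absurd rfl h
  | cons y ys ih =>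
    intro full a st hdrop _
    have hget : full.getD a 0 = y := by
      have h0 : full[a]? = some y := by
        have : (full.drop a)[0]? = some y := by rw [hdrop]; rfl
        simpa using this
      simp [List.getD, h0]
    have hdrop' : full.drop (a + 1) = ys := by
      rw [← List.tail_drop, hdrop]; rfl
    simp only [List.length_cons, List.range'_succ, List.foldl_cons, hget]
    cases ys with
    | nil =>
      simp only [List.length_nil, List.range'_zero, List.foldl_nil, lmRefN]
      split_ifs with h <;> simp
    | cons z zs =>
      rw [ih full (a + 1) _ hdrop' (by simp)]
      simp only [lmRefN]
      by_cases h1 : y ≤ (lmRefN (z :: zs)).1 <;> by_cases h2 : st.1 ≤ y <;>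
        simp [h1, h2, ge_iff_le] <;>
        first
          | (split_ifs with h3 <;>
              first
                | (simp only [Prod.mk.injEq]; refine ⟨by rfl, by push_cast; ring⟩)
                | (simp only [Prod.mk.injEq]; refine ⟨trivial, by push_cast; ring⟩)
                | rfl
                | omega
                | (exfalso; omega))
          | (intro h4; exact absurd h4 (by omega))

-- A equals the reference on nonempty lists
theorem lastMaxInList_eq_ref (x : Int) (t : List Int) :
    lastMaxInList (x :: t) = ((lmRefN (x :: t)).1, ((lmRefN (x :: t)).2 : Int)) := by
  unfold lastMaxInList
  rw [PySem.List.pyRange_zero_natCast]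
  rw [List.foldl_map]
  have hrange : List.range (x :: t).length = List.range' 0 (x :: t).length := by
    rw [List.range_eq_range']
  rw [hrange]
  have hgd : ∀ (k : Nat), PySem.List.pyGetD (x :: t) ((k : Nat) : Int) 0 = (x :: t).getD k 0 := by
    intro k; rw [PySem.List.pyGetD_natCast]
  simp only [hgd]
  have h0 : PySem.List.pyGetD (x :: t) 0 0 = x := by simp
  rw [h0]
  rw [foldA (x :: t) (x :: t) 0 (x, 0) (by simp) (by simp)]
  have hmax : x ≤ (lmRefN (x :: t)).1 := lmRefN_fst_isMax _ x (by simp)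
  rw [if_pos (by simpa using hmax)]
  simp

-- B equals the reference on nonempty lists
theorem lastMaxInList_alt_eq_ref (x : Int) (t : List Int) :
    lastMaxInList_alt (x :: t) = ((lmRefN (x :: t)).1, ((lmRefN (x :: t)).2 : Int)) := by
  unfold lastMaxInList_alt
  rw [PySem.List.max?_id_cons]
  simp only [Option.getD_some]
  rw [← lmRefN_fst_eq_foldl_max]
  rw [lmRefN_rev_index x t]
  simp only [Option.getD_some, List.length_cons]
  have hle := lmRefN_snd_le x t
  simp only [Prod.mk.injEq]
  refine ⟨trivial, ?_⟩
  push_cast [Nat.cast_sub hle]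
  omega

-- ===== VERDICT (by name: the statement is the Claim_ definition above) =====
theorem lastMaxInList_spec : Claim_equal_lastMaxInList := by
  intro l _ hpre
  unfold Spec_lastMaxInList
  cases l with
  | nil => exact absurd rfl hpre
  | cons x t => rw [lastMaxInList_eq_ref, lastMaxInList_alt_eq_ref]
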